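-- pv_equiv track=rewrite | github.com/c788630/Numclass | src/numclass/classifiers/conjectures.py | _crt_list
-- ===== SOURCE A (Python) =====
-- def _crt_list(a_mod_m: list[tuple[int, int]]) -> tuple[int, int] | None:
--     a, m = a_mod_m[0]
--     for ai, mi in a_mod_m[1:]:
--         res = _crt_pair(a, m, ai, mi)
--         if res is None:
--             return None
--         a, m = res
--     return (a, m)
--
-- def _crt_pair(a1: int, m1: int, a2: int, m2: int) -> tuple[int, int] | None:
--     """
--     Solve x ≡ a1 (mod m1), x ≡ a2 (mod m2).
--     Returns (a, m) with x ≡ a (mod m) or None if incompatible.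
--     For pairwise-coprime moduli (our case), this always succeeds.
--     """
--     g = _gcd(m1, m2)
--     if (a2 - a1) % g != 0:
--         return None
--     # Reduce to coprime case
--     m1p, m2p = m1 // g, m2 // g
--     inv = _inv_mod(m1p % m2p, m2p)
--     if inv is None:
--         return None
--     t = ((a2 - a1) // g) % m2p
--     k = (t * inv) % m2p
--     a = (a1 + k * m1) % (m1 * m2p)
--     m = m1 * m2p
--     return (a, m)
--
-- def _gcd(a: int, b: int) -> int:
--     while b:
--         a, b = b, a % b
--     return abs(a)
--
-- def _egcd(a: int, b: int) -> tuple[int, int, int]: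
--     # returns (g, x, y) with ax + by = g = gcd(a,b)
--     if b == 0:
--         return (abs(a), 1 if a >= 0 else -1, 0)
--     g, x1, y1 = _egcd(b, a % b)
--     return (g, y1, x1 - (a // b) * y1)
--
-- def _inv_mod(a: int, m: int) -> int | None:
--     a %= m
--     g, x, _ = _egcd(a, m)
--     if g != 1:
--         return None
--     return x % m
-- ===== SOURCE B (Python) =====
-- def _crt_list(a_mod_m: list[tuple[int, int]]) -> tuple[int, int] | None:
--     acc = a_mod_m[0]
--     for ai, mi in a_mod_m[1:]:
--         acc = _crt_pair(acc[0], acc[1], ai, mi)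
--         if acc is None:
--             return None
--     return acc
--
-- def _crt_pair(a1: int, m1: int, a2: int, m2: int) -> tuple[int, int] | None:
--     # one iterative extended-Euclid pass gives the gcd and a Bezout coefficient at once
--     old_r, r = m1, m2
--     old_x, x = 1, 0
--     while r:
--         q = old_r // r
--         old_r, r = r, old_r - q * r
--         old_x, x = x, old_x - q * x
--     if old_r < 0:
--         old_r, old_x = -old_r, -old_x
--     g, u = old_r, old_x          # g = gcd(m1, m2) >= 0 and m1*u ≡ g (mod m2)
--     d = a2 - a1
--     if d % g != 0:
--         return None
--     m2p = m2 // g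
--     l = m1 * m2p
--     k = (d // g * u) % m2p
--     return ((a1 + k * m1) % l, l)
-- ===== Notes on version B (the rewrite author's own statement) =====
-- stated objective: simpler
-- what changed: B's pair combiner runs a single iterative extended-Euclid loop that yields the gcd and a Bezout coefficient at once, replacing A's three helpers (_gcd, recursive _egcd, _inv_mod and its extra reduce-then-invert pass).
-- outside the precondition, e.g. on _crt_list([(-4, -22), (3, 0), (-1169864462, 1)]): A returns None, B returns None
import Mathlib
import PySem

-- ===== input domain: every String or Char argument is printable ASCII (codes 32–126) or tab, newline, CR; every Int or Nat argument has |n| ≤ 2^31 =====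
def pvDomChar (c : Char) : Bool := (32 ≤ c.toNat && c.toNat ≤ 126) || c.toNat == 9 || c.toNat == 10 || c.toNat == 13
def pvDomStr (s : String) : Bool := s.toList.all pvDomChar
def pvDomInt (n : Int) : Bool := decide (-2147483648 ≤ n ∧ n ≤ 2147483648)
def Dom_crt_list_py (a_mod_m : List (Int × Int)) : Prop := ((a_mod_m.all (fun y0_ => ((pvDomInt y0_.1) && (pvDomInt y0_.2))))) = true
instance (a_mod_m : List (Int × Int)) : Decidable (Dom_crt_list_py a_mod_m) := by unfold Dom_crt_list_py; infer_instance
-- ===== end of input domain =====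

-- B replaces A's three number-theory helpers (_gcd, recursive _egcd, _inv_mod) by a single
-- iterative extended-Euclid pass inside the pair combiner, which yields the gcd and a
-- Bezout coefficient at once; objective: simpler (one Euclid run per pair instead of three).

-- termination helper for the Euclid recursions (|a % b| < |b| for b ≠ 0)
theorem pymod_natAbs_lt (a b : Int) (hb : b ≠ 0) : (PySem.Int.mod a b).natAbs < b.natAbs := by
  rcases lt_or_gt_of_ne hb with h | h
  · have := PySem.Int.mod_neg_bounds a h; omega
  · have h1 := PySem.Int.mod_nonneg a h; have h2 := PySem.Int.mod_lt a h; omega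

-- ===== PORT A =====
def pyGcd (a b : Int) : Int :=
  if hb : b = 0 then (a.natAbs : Int)
  else pyGcd b (PySem.Int.mod a b)
termination_by b.natAbs
decreasing_by exact pymod_natAbs_lt a b hb

def pyEgcd (a b : Int) : Int × Int × Int :=
  if hb : b = 0 then ((a.natAbs : Int), if a ≥ 0 then 1 else -1, 0)
  else
    let r := pyEgcd b (PySem.Int.mod a b)
    (r.1, r.2.2, r.2.1 - (PySem.Int.floordiv a b) * r.2.2)
termination_by b.natAbs
decreasing_by exact pymod_natAbs_lt a b hb

def pyInvMod (a m : Int) : Option Int :=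
  let a' := PySem.Int.mod a m
  let r := pyEgcd a' m
  if r.1 ≠ 1 then none else some (PySem.Int.mod r.2.1 m)

def crtPair (a1 m1 a2 m2 : Int) : Option (Int × Int) :=
  let g := pyGcd m1 m2
  if PySem.Int.mod (a2 - a1) g ≠ 0 then none
  else
    let m1p := PySem.Int.floordiv m1 g
    let m2p := PySem.Int.floordiv m2 g
    match pyInvMod (PySem.Int.mod m1p m2p) m2p with
    | none => none
    | some inv =>
      let t := PySem.Int.mod (PySem.Int.floordiv (a2 - a1) g) m2p
      let k := PySem.Int.mod (t * inv) m2p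
      some (PySem.Int.mod (a1 + k * m1) (m1 * m2p), m1 * m2p)

def crt_list_py (a_mod_m : List (Int × Int)) : Option (Int × Int) :=
  match a_mod_m with
  | [] => none  -- Python raises IndexError here (outside Pre_)
  | (a, m) :: rest =>
    rest.foldl (fun st p =>
      match st with
      | none => none                       -- the early 'return None'
      | some (a, m) => crtPair a m p.1 p.2) (some (a, m))

-- ===== PORT B =====
def egcdLoop (old_r r old_x x : Int) : Int × Int :=
  if hr : r = 0 then (old_r, old_x)
  else
    let q := PySem.Int.floordiv old_r r
    egcdLoop r (old_r - q * r) x (old_x - q * x)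
termination_by r.natAbs
decreasing_by
  have : old_r - PySem.Int.floordiv old_r r * r = PySem.Int.mod old_r r := by
    simp [PySem.Int.mod, PySem.Int.floordiv, Int.fmod_def]; ring
  rw [this]; exact pymod_natAbs_lt old_r r hr

def crtPairB (a1 m1 a2 m2 : Int) : Option (Int × Int) :=
  let p := egcdLoop m1 m2 1 0
  let g := if p.1 < 0 then -p.1 else p.1
  let u := if p.1 < 0 then -p.2 else p.2
  let d := a2 - a1
  if PySem.Int.mod d g ≠ 0 then none
  else
    let m2p := PySem.Int.floordiv m2 g
    let l := m1 * m2p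
    let k := PySem.Int.mod (PySem.Int.floordiv d g * u) m2p
    some (PySem.Int.mod (a1 + k * m1) l, l)

def crt_list_py_alt (a_mod_m : List (Int × Int)) : Option (Int × Int) :=
  match a_mod_m with
  | [] => none  -- Python B raises IndexError here (outside Pre_)
  | acc0 :: rest =>
    rest.foldl (fun acc p =>
      match acc with
      | none => none                       -- the early 'return None'
      | some a => crtPairB a.1 a.2 p.1 p.2) (some acc0)

-- ===== PRECONDITION & SPEC =====
-- Pre_ excludes the empty list (IndexError) and lists of length ≥ 2 containing a zero
-- modulus, on which A normally raises ZeroDivisionError; on some of those an earlier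
-- incompatibility makes A return None before the zero modulus is reached, and B returns
-- None there too (Pre_ is narrower than A's exact domain only on such inputs).
def Pre_crt_list_py (a_mod_m : List (Int × Int)) : Prop :=
  a_mod_m ≠ [] ∧ (∀ p ∈ a_mod_m.tail, p.2 ≠ 0) ∧
    (a_mod_m.length = 1 ∨ ∀ p ∈ a_mod_m, p.2 ≠ 0)
instance (a_mod_m : List (Int × Int)) : Decidable (Pre_crt_list_py a_mod_m) := by
  unfold Pre_crt_list_py; infer_instance

def pvWitness_crt_list_py : (List (Int × Int)) := [(1, 3), (2, 5)]

def Spec_crt_list_py (a_mod_m : List (Int × Int)) (out : Option (Int × Int)) : Prop :=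
  out = crt_list_py_alt a_mod_m
instance (a_mod_m : List (Int × Int)) (out : Option (Int × Int)) : Decidable (Spec_crt_list_py a_mod_m out) := by
  unfold Spec_crt_list_py; infer_instance

-- ===== CLAIM (what is proved, stated in full; the proofs are below) =====
def Claim_equal_crt_list_py : Prop := ∀ (a_mod_m : List (Int × Int)), Dom_crt_list_py a_mod_m → Pre_crt_list_py a_mod_m → Spec_crt_list_py a_mod_m (crt_list_py a_mod_m)

-- ===== LEMMAS AND PROOFS =====

-- the modulus divides the difference between a number and its Python-mod
theorem dvd_sub_pymod (a b : Int) : b ∣ a - PySem.Int.mod a b := by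
  simp only [PySem.Int.mod, Int.fmod_def]
  exact ⟨a.fdiv b, by ring⟩

theorem pymod_modeq (a n : Int) : PySem.Int.mod a n ≡ a [ZMOD n] :=
  Int.modEq_iff_dvd.mpr (dvd_sub_pymod a n)

-- Python-mod respects congruence
theorem pymod_congr {n a b : Int} (h : a ≡ b [ZMOD n]) :
    PySem.Int.mod a n = PySem.Int.mod b n := by
  rcases eq_or_ne n 0 with hn | hn
  · subst hn
    have := h.dvd
    simp [PySem.Int.mod] at *
    omega
  · have hmm : PySem.Int.mod a n ≡ PySem.Int.mod b n [ZMOD n] :=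
      ((pymod_modeq a n).trans h).trans (pymod_modeq b n).symm
    have hd : n ∣ PySem.Int.mod b n - PySem.Int.mod a n := hmm.dvd
    have hz : PySem.Int.mod b n - PySem.Int.mod a n = 0 := by
      apply Int.eq_zero_of_dvd_of_natAbs_lt_natAbs hd
      rcases lt_or_gt_of_ne hn with hlt | hgt
      · have b1 := PySem.Int.mod_neg_bounds a hlt
        have b2 := PySem.Int.mod_neg_bounds b hlt
        omega
      · have a1 := PySem.Int.mod_nonneg a hgt; have a2 := PySem.Int.mod_lt a hgt
        have b1 := PySem.Int.mod_nonneg b hgt; have b2 := PySem.Int.mod_lt b hgt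
        omega
    omega

theorem gcd_pymod (a b : Int) : Int.gcd b (PySem.Int.mod a b) = Int.gcd a b := by
  have : PySem.Int.mod a b = a + b * (-(a.fdiv b)) := by
    simp [PySem.Int.mod, Int.fmod_def]; ring
  rw [this, Int.gcd_add_mul_left_right, Int.gcd_comm]

theorem pyGcd_eq (a b : Int) : pyGcd a b = (Int.gcd a b : Int) := by
  induction a, b using pyGcd.induct with
  | case1 a => rw [pyGcd]; simp
  | case2 a b hb ih => rw [pyGcd]; simp only [hb, dite_false]; rw [ih, gcd_pymod]

theorem pyEgcd_spec (a b : Int) :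
    (pyEgcd a b).1 = (Int.gcd a b : Int) ∧
    a * (pyEgcd a b).2.1 + b * (pyEgcd a b).2.2 = (pyEgcd a b).1 := by
  induction a, b using pyEgcd.induct with
  | case1 a =>
    rw [pyEgcd]
    refine ⟨by simp, ?_⟩
    show a * (if a ≥ 0 then (1:Int) else -1) + 0 * (0:Int) = (a.natAbs : Int)
    split <;> rename_i h <;> omega
  | case2 a b hb ih =>
    rw [pyEgcd]
    simp only [hb, dif_neg, not_false_iff]
    obtain ⟨hg, hbez⟩ := ih
    refine ⟨by simpa using by rw [hg, gcd_pymod], ?_⟩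
    have hm : PySem.Int.mod a b = a - b * a.fdiv b := by
      simp [PySem.Int.mod, Int.fmod_def]
    show a * (pyEgcd b (PySem.Int.mod a b)).2.2 +
        b * ((pyEgcd b (PySem.Int.mod a b)).2.1 -
          PySem.Int.floordiv a b * (pyEgcd b (PySem.Int.mod a b)).2.2) =
        (pyEgcd b (PySem.Int.mod a b)).1
    have hfd : PySem.Int.floordiv a b = a.fdiv b := rfl
    rw [hfd]
    linear_combination hbez - (pyEgcd b (PySem.Int.mod a b)).2.2 * hm

-- when a is invertible mod m, pyInvMod returns an inverse
theorem pyInvMod_spec (a m : Int) (h : Int.gcd a m = 1) :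
    ∃ v, pyInvMod a m = some v ∧ a * v ≡ 1 [ZMOD m] := by
  unfold pyInvMod
  obtain ⟨hg, hbez⟩ := pyEgcd_spec (PySem.Int.mod a m) m
  have hgam : Int.gcd (PySem.Int.mod a m) m = 1 := by
    rw [Int.gcd_comm, gcd_pymod]; exact h
  rw [hgam] at hg; norm_num at hg
  refine ⟨PySem.Int.mod (pyEgcd (PySem.Int.mod a m) m).2.1 m, by simp [hg], ?_⟩
  set x := (pyEgcd (PySem.Int.mod a m) m).2.1 with hx
  set y := (pyEgcd (PySem.Int.mod a m) m).2.2 with hy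
  rw [hg] at hbez
  have h1 : PySem.Int.mod a m * x ≡ 1 [ZMOD m] :=
    Int.modEq_iff_dvd.mpr ⟨y, by linarith⟩
  calc a * PySem.Int.mod x m ≡ a * x [ZMOD m] := (pymod_modeq x m).mul_left a
    _ ≡ PySem.Int.mod a m * x [ZMOD m] := ((pymod_modeq a m).mul_right x).symm
    _ ≡ 1 [ZMOD m] := h1

-- the iterative extended Euclid of B: gcd magnitude and a Bezout-style congruence
theorem egcdLoop_spec (m1 m2 : Int) :
    ∀ old_r r old_x x, m2 ∣ old_r - m1 * old_x → m2 ∣ r - m1 * x →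
      (egcdLoop old_r r old_x x).1.natAbs = Int.gcd old_r r ∧
      m2 ∣ (egcdLoop old_r r old_x x).1 - m1 * (egcdLoop old_r r old_x x).2 := by
  intro old_r r old_x x
  induction old_r, r, old_x, x using egcdLoop.induct with
  | case1 old_r old_x x =>
    intro h1 _; rw [egcdLoop]; simp [h1]
  | case2 old_r r old_x x hr q ih =>
    intro h1 h2
    rw [egcdLoop]
    simp only [hr, dif_neg, not_false_iff]
    have hmod : old_r - PySem.Int.floordiv old_r r * r = PySem.Int.mod old_r r := by
      simp [PySem.Int.mod, PySem.Int.floordiv, Int.fmod_def]; ring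
    have hdvd : m2 ∣ old_r - PySem.Int.floordiv old_r r * r -
        m1 * (old_x - PySem.Int.floordiv old_r r * x) := by
      have he : old_r - PySem.Int.floordiv old_r r * r -
          m1 * (old_x - PySem.Int.floordiv old_r r * x)
          = (old_r - m1 * old_x) - PySem.Int.floordiv old_r r * (r - m1 * x) := by ring
      rw [he]; exact dvd_sub h1 (Dvd.dvd.mul_left h2 _)
    obtain ⟨hg, hb⟩ := ih h2 hdvd
    exact ⟨by rw [hg, hmod, gcd_pymod], hb⟩

-- g·(m //py g) = m for g ∣ m  (exact division)
theorem fdiv_exact {g m : Int} (h : g ∣ m) : g * PySem.Int.floordiv m g = m := by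
  rcases eq_or_ne g 0 with h0 | h0
  · subst h0; simp at h ⊢; omega
  · have he : PySem.Int.floordiv m g = m / g := Int.fdiv_eq_ediv_of_dvd h
    rw [he, Int.mul_ediv_cancel' h]

-- the central fact: A's pair combiner and B's pair combiner agree whenever m2 ≠ 0
theorem crtPair_eq (a1 m1 a2 m2 : Int) (hm2 : m2 ≠ 0) :
    crtPair a1 m1 a2 m2 = crtPairB a1 m1 a2 m2 := by
  have hGpos : 0 < Int.gcd m1 m2 := Int.gcd_pos_iff.mpr (Or.inr hm2)
  have hgd1 : ((Int.gcd m1 m2 : Nat) : Int) ∣ m1 := Int.gcd_dvd_left m1 m2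
  have hgd2 : ((Int.gcd m1 m2 : Nat) : Int) ∣ m2 := Int.gcd_dvd_right m1 m2
  obtain ⟨hnat, hdvd⟩ := egcdLoop_spec m1 m2 m1 m2 1 0 ⟨0, by ring⟩ ⟨1, by ring⟩
  simp only [crtPair, crtPairB, pyGcd_eq]
  set p := egcdLoop m1 m2 1 0 with hp
  have hgB : (if p.1 < 0 then -p.1 else p.1) = ((Int.gcd m1 m2 : Nat) : Int) := by
    split <;> omega
  have hu : m2 ∣ ((Int.gcd m1 m2 : Nat) : Int) - m1 * (if p.1 < 0 then -p.2 else p.2) := by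
    split <;> rename_i hs
    · have := dvd_neg.mpr hdvd
      have he : -(p.1 - m1 * p.2) = -p.1 - m1 * (-p.2) := by ring
      rw [he] at this
      have hpg : -p.1 = ((Int.gcd m1 m2 : Nat) : Int) := by omega
      rwa [hpg] at this
    · have hpg : p.1 = ((Int.gcd m1 m2 : Nat) : Int) := by omega
      rwa [hpg] at hdvd
  rw [hgB]
  set u := (if p.1 < 0 then -p.2 else p.2) with hudef
  set g := ((Int.gcd m1 m2 : Nat) : Int) with hgdef
  by_cases hc : PySem.Int.mod (a2 - a1) g = 0
  case neg => simp [hc]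
  case pos =>
  simp only [hc]
  have hgne : g ≠ 0 := by
    rw [hgdef]; exact_mod_cast hGpos.ne'
  set m1p := PySem.Int.floordiv m1 g with hm1p
  set m2p := PySem.Int.floordiv m2 g with hm2p
  have hm1e : g * m1p = m1 := fdiv_exact hgd1
  have hm2e : g * m2p = m2 := fdiv_exact hgd2
  have hm2pne : m2p ≠ 0 := by
    intro h0; apply hm2; rw [← hm2e, h0, mul_zero]
  have hcop : Int.gcd m1p m2p = 1 := by
    have e1 : m1p = m1 / g := by rw [hm1p]; exact Int.fdiv_eq_ediv_of_dvd hgd1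
    have e2 : m2p = m2 / g := by rw [hm2p]; exact Int.fdiv_eq_ediv_of_dvd hgd2
    rw [e1, e2, hgdef]
    exact Int.gcd_ediv_gcd_ediv_gcd hGpos
  have hgmod : Int.gcd (PySem.Int.mod m1p m2p) m2p = 1 := by
    rw [Int.gcd_comm, gcd_pymod]; exact hcop
  obtain ⟨v, hv, hvinv⟩ := pyInvMod_spec (PySem.Int.mod m1p m2p) m2p hgmod
  rw [hv]
  have hv1 : m1p * v ≡ 1 [ZMOD m2p] :=
    (((pymod_modeq m1p m2p).mul_right v).symm).trans hvinv
  have hu1 : m1p * u ≡ 1 [ZMOD m2p] := by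
    obtain ⟨c, hc2⟩ := hu
    have hcc : 1 - m1p * u = m2p * c := by
      apply mul_left_cancel₀ hgne
      calc g * (1 - m1p * u) = g - m1 * u := by rw [← hm1e]; ring
        _ = m2 * c := hc2
        _ = g * (m2p * c) := by rw [← hm2e]; ring
    exact Int.modEq_iff_dvd.mpr ⟨c, hcc⟩
  have huv : v ≡ u [ZMOD m2p] := by
    calc v = v * 1 := by ring
      _ ≡ v * (m1p * u) [ZMOD m2p] := hu1.symm.mul_left v
      _ = u * (m1p * v) := by ring
      _ ≡ u * 1 [ZMOD m2p] := hv1.mul_left u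
      _ = u := by ring
  have hk : PySem.Int.mod (PySem.Int.mod (PySem.Int.floordiv (a2 - a1) g) m2p * v) m2p
      = PySem.Int.mod (PySem.Int.floordiv (a2 - a1) g * u) m2p := by
    apply pymod_congr
    exact ((pymod_modeq (PySem.Int.floordiv (a2 - a1) g) m2p).mul huv)
  simp only [hk]

-- A's fold equals B's fold on any tail of nonzero moduli, from any start state
theorem fold_eq_fold (rest : List (Int × Int)) (h : ∀ p ∈ rest, p.2 ≠ 0)
    (st : Option (Int × Int)) :
    rest.foldl (fun st p =>
      match st with
      | none => none
      | some (a, m) => crtPair a m p.1 p.2) st =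
    rest.foldl (fun acc p =>
      match acc with
      | none => none
      | some a => crtPairB a.1 a.2 p.1 p.2) st := by
  induction rest generalizing st with
  | nil => rfl
  | cons p rest ih =>
    obtain ⟨ai, mi⟩ := p
    have hmi : mi ≠ 0 := h (ai, mi) (List.mem_cons_self ..)
    simp only [List.foldl_cons]
    have hstep : (match st with
        | none => none
        | some (a, m) => crtPair a m ai mi) =
        (match st with
        | none => none
        | some a => crtPairB a.1 a.2 ai mi) := by
      cases st with
      | none => rfl
      | some a => exact crtPair_eq a.1 a.2 ai mi hmi
    rw [hstep]
    exact ih (fun q hq => h q (List.mem_cons_of_mem _ hq)) _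

-- ===== VERDICT (by name: the statement is the Claim_ definition above) =====
theorem crt_list_py_spec : Claim_equal_crt_list_py := by
  intro l _ hpre
  obtain ⟨hne, htail, _⟩ := hpre
  unfold Spec_crt_list_py
  match l with
  | [] => exact absurd rfl hne
  | (a, m) :: rest =>
    simp only [crt_list_py, crt_list_py_alt]
    exact fold_eq_fold rest (by simpa using htail) (some (a, m))
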